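-- pv_equiv track=rewrite | github.com/Marquez-David/FUNDAMENTOS-PROGRAMACION | Cinco vocales.py | vocales_en_palabra
-- ===== SOURCE A (Python) =====
-- def vocales_en_palabra(palabra):
--     """ str --> boolean
--     OBJ: determina si una palabra contiene las cinco vocales. """
--     listaPalabra = []
--     listaPalabra = list(palabra)
--     contadorA = 0
--     contadorE = 0
--     contadorI = 0
--     contadorO = 0
--     contadorU = 0
--     for elem in listaPalabra:
--         if elem == "a":
--             contadorA = contadorA + 1
--         elif elem == "e":
--             contadorE = contadorE + 1
--         elif elem == "i":
--             contadorI = contadorI + 1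
--         elif elem == "o":
--             contadorO = contadorO + 1
--         elif elem == "u":
--             contadorU = contadorU + 1
--     if contadorA >=1 and contadorE >=1 and contadorI >=1 and contadorO >=1 and contadorU >=1:
--         return True
--     else:
--         return False
-- ===== SOURCE B (Python) =====
-- def vocales_en_palabra(palabra):
--     """ str --> boolean
--     OBJ: determina si una palabra contiene las cinco vocales. """
--     return set("aeiou").issubset(set(palabra))
-- ===== Notes on version B (the rewrite author's own statement) =====
-- stated objective: simpler
-- what changed: Replaces the five per-vowel counters, the elif ladder and the final five-way conjunction with a single subset test of the vowel set against the set of characters of the word.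
import Mathlib
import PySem

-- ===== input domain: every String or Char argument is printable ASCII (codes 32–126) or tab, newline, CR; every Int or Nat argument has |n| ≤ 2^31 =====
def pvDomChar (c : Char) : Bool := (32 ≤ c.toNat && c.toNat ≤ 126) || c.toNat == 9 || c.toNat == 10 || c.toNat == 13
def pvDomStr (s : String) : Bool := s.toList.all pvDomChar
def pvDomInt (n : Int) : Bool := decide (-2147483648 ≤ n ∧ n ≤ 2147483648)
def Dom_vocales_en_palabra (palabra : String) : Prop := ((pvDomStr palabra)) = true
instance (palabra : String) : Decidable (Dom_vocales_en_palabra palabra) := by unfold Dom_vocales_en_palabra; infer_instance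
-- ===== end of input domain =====

-- B replaces A's five counters and elif ladder with one set-subset test (objective: simpler).

-- ===== PORT A =====
-- the loop over list(palabra) with the five counters and the elif ladder
def vocales_en_palabra_loop (l : List Char) (s : Int × Int × Int × Int × Int) :
    Int × Int × Int × Int × Int :=
  match l with
  | [] => s
  | elem :: rest =>
    let s' :=
      if elem = 'a' then (s.1 + 1, s.2.1, s.2.2.1, s.2.2.2.1, s.2.2.2.2)
      else if elem = 'e' then (s.1, s.2.1 + 1, s.2.2.1, s.2.2.2.1, s.2.2.2.2)
      else if elem = 'i' then (s.1, s.2.1, s.2.2.1 + 1, s.2.2.2.1, s.2.2.2.2)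
      else if elem = 'o' then (s.1, s.2.1, s.2.2.1, s.2.2.2.1 + 1, s.2.2.2.2)
      else if elem = 'u' then (s.1, s.2.1, s.2.2.1, s.2.2.2.1, s.2.2.2.2 + 1)
      else s
    vocales_en_palabra_loop rest s'

def vocales_en_palabra (palabra : String) : Bool :=
  let s := vocales_en_palabra_loop palabra.toList (0, 0, 0, 0, 0)
  if 1 ≤ s.1 ∧ 1 ≤ s.2.1 ∧ 1 ≤ s.2.2.1 ∧ 1 ≤ s.2.2.2.1 ∧ 1 ≤ s.2.2.2.2 then
    true
  else
    false

-- ===== PORT B =====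
def vocales_en_palabra_alt (palabra : String) : Bool :=
  PySem.Set.issubset (PySem.Set.ofList "aeiou".toList) (PySem.Set.ofList palabra.toList)

-- ===== PRECONDITION & SPEC =====
def Spec_vocales_en_palabra (palabra : String) (out : Bool) : Prop := out = vocales_en_palabra_alt palabra
instance (palabra : String) (out : Bool) : Decidable (Spec_vocales_en_palabra palabra out) := by unfold Spec_vocales_en_palabra; infer_instance

-- ===== CLAIM (what is proved, stated in full; the proofs are below) =====
def Claim_equal_vocales_en_palabra : Prop := ∀ (palabra : String), Dom_vocales_en_palabra palabra → Spec_vocales_en_palabra palabra (vocales_en_palabra palabra)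

-- ===== LEMMAS AND PROOFS =====

-- each counter ends at its start plus the count of its vowel (the vowels are pairwise distinct)
theorem vocales_loop_counts (l : List Char) (s : Int × Int × Int × Int × Int) :
    vocales_en_palabra_loop l s =
      (s.1 + l.count 'a', s.2.1 + l.count 'e', s.2.2.1 + l.count 'i',
       s.2.2.2.1 + l.count 'o', s.2.2.2.2 + l.count 'u') := by
  induction l generalizing s with
  | nil => simp [vocales_en_palabra_loop]
  | cons elem rest ih =>
    simp only [vocales_en_palabra_loop]
    by_cases ha : elem = 'a'
    · subst ha; simp [ih, List.count_cons]; omega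
    · by_cases he : elem = 'e'
      · subst he; simp [ha, ih, List.count_cons]; omega
      · by_cases hi : elem = 'i'
        · subst hi; simp [ha, he, ih, List.count_cons]; omega
        · by_cases ho : elem = 'o'
          · subst ho; simp [ha, he, hi, ih, List.count_cons]; omega
          · by_cases hu : elem = 'u'
            · subst hu; simp [ha, he, hi, ho, ih, List.count_cons]; omega
            · simp [ha, he, hi, ho, hu, ih, List.count_cons]

theorem one_le_count_iff (l : List Char) (c : Char) :
    (1 ≤ (l.count c : Int)) ↔ c ∈ l := by
  rw [show ((1:Int) ≤ (l.count c : Int)) ↔ 1 ≤ l.count c by exact_mod_cast Iff.rfl]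
  exact List.one_le_count_iff

-- ===== VERDICT (by name: the statement is the Claim_ definition above) =====
theorem vocales_en_palabra_spec : Claim_equal_vocales_en_palabra := by
  intro palabra _
  unfold Spec_vocales_en_palabra vocales_en_palabra vocales_en_palabra_alt
  rw [vocales_loop_counts]
  simp only [zero_add]
  rw [Bool.eq_iff_iff]
  rw [PySem.Set.issubset_iff]
  constructor
  · intro h
    split_ifs at h with hc
    · obtain ⟨h1, h2, h3, h4, h5⟩ := hc
      rw [one_le_count_iff] at h1 h2 h3 h4 h5
      intro x hx
      rw [PySem.Set.mem_ofList] at hx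
      rw [PySem.Set.mem_ofList]
      fin_cases hx
      · exact h1
      · exact h2
      · exact h3
      · exact h4
      · exact h5
  · intro h
    have key : ∀ c ∈ "aeiou".toList, c ∈ palabra.toList := by
      intro c hc
      rw [← PySem.Set.mem_ofList palabra.toList c]
      exact h _ ((PySem.Set.mem_ofList _ _).mpr hc)
    have h1 := key 'a' (by decide)
    have h2 := key 'e' (by decide)
    have h3 := key 'i' (by decide)
    have h4 := key 'o' (by decide)
    have h5 := key 'u' (by decide)
    rw [← one_le_count_iff] at h1 h2 h3 h4 h5
    simp [h1, h2, h3, h4, h5]
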